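-- pv_equiv track=rewrite | github.com/spiritualized/cleartag | cleartag/functions.py | normalize_path_chars
-- ===== SOURCE A (Python) =====
-- def normalize_path_chars(path):
--     tmp = path
--
--     replacements = {
--         ':': '：',
--         '/': '∕',
--         '\\': '∕',
--         '*': "٭",
--         '?': '﹖',
--         '"': 'ˮ',
--         '<': '〈',
--         '>': '〉',
--         '|': '⏐'
--     }
--
--     for x in replacements:
--         tmp = tmp.replace(x, replacements[x])
--
--     return tmp
-- ===== SOURCE B (Python) =====
-- def normalize_path_chars(path):
--     replacements = {
--         ':': '：',
--         '/': '∕',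
--         '\\': '∕',
--         '*': "٭",
--         '?': '﹖',
--         '"': 'ˮ',
--         '<': '〈',
--         '>': '〉',
--         '|': '⏐'
--     }
--     return ''.join(replacements.get(c, c) for c in path)
-- ===== Notes on version B (the rewrite author's own statement) =====
-- stated objective: idiomatic
-- what changed: B makes a single pass over the characters of path, substituting each via one dict lookup, instead of A's nine sequential full-string replace passes (one per replacement key).
import Mathlib
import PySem

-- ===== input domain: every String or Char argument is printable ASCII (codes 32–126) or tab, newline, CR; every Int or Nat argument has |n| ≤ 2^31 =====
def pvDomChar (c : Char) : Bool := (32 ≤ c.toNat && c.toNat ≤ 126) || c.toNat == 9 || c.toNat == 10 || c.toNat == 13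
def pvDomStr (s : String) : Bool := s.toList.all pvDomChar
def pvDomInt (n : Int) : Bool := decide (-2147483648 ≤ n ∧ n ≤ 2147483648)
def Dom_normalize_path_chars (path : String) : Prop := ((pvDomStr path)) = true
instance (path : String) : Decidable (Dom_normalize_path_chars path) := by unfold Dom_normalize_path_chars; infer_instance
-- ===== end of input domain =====

-- B replaces A's nine sequential full-string replace passes by one pass over the characters
-- with a per-character dict lookup (same replacement table, identical output); objective: idiomatic.

-- ===== PORT A =====
def pvReplacements : PySem.Dict String String :=
  PySem.Dict.ofList [(":", "："), ("/", "∕"), ("\\", "∕"), ("*", "٭"), ("?", "﹖"),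
    ("\"", "ˮ"), ("<", "〈"), (">", "〉"), ("|", "⏐")]

def normalize_path_chars (path : String) : String :=
  pvReplacements.keys.foldl (fun tmp x => PySem.Str.replace tmp x (pvReplacements.getD x "")) path

-- ===== PORT B =====
def pvReplacementsAlt : PySem.Dict Char Char :=
  PySem.Dict.ofList [(':', '：'), ('/', '∕'), ('\\', '∕'), ('*', '٭'), ('?', '﹖'),
    ('"', 'ˮ'), ('<', '〈'), ('>', '〉'), ('|', '⏐')]

def normalize_path_chars_alt (path : String) : String :=
  String.ofList (path.toList.map (fun c => pvReplacementsAlt.getD c c))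

-- ===== PRECONDITION & SPEC =====
def Spec_normalize_path_chars (path : String) (out : String) : Prop := out = normalize_path_chars_alt path
instance (path : String) (out : String) : Decidable (Spec_normalize_path_chars path out) := by unfold Spec_normalize_path_chars; infer_instance

-- ===== CLAIM (what is proved, stated in full; the proofs are below) =====
def Claim_equal_normalize_path_chars : Prop := ∀ (path : String), Dom_normalize_path_chars path → Spec_normalize_path_chars path (normalize_path_chars path)

-- ===== LEMMAS AND PROOFS =====
theorem go_single (a b : Char) : ∀ (l : List Char) (fuel : Nat) (acc : List Char), l.length ≤ fuel →
    PySem.Chars.replace.go [a] [b] fuel l acc = acc.reverse ++ l.map (fun c => if c = a then b else c) := by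
  intro l
  induction l with
  | nil => intro fuel acc _; cases fuel <;> simp [PySem.Chars.replace.go]
  | cons c t ih =>
    intro fuel acc h
    match fuel with
    | fuel + 1 =>
      rw [PySem.Chars.replace.go]
      by_cases hc : c = a
      · have hp : List.isPrefixOf [a] (c :: t) = true := by simp [List.isPrefixOf, hc]
        rw [hp]
        simp only [if_true, List.length_singleton, List.drop_succ_cons, List.drop_zero]
        rw [ih fuel (([b]).reverse ++ acc) (by simpa using h)]
        simp [hc]
      · have hp : List.isPrefixOf [a] (c :: t) = false := by
          simp [List.isPrefixOf]; exact fun h' => (hc h'.symm).elim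
        rw [hp]
        simp only [Bool.false_eq_true, if_false]
        rw [ih fuel (c :: acc) (by simpa using h)]
        simp [hc]

theorem replace_single (a b : Char) (cs : List Char) :
    PySem.Chars.replace cs [a] [b] = cs.map (fun c => if c = a then b else c) := by
  rw [PySem.Chars.replace]
  simp [go_single a b cs cs.length [] le_rfl]

abbrev sub (a b c : Char) : Char := if c = a then b else c

theorem str_replace_single (s : String) (a b : Char) (oa ob : String)
    (ha : oa.toList = [a]) (hb : ob.toList = [b]) :
    PySem.Str.replace s oa ob = String.ofList (s.toList.map (sub a b)) := by
  rw [PySem.Str.replace, ha, hb, replace_single]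

theorem main_eq (path : String) : normalize_path_chars path = normalize_path_chars_alt path := by
  have hk : pvReplacements.keys = [":", "/", "\\", "*", "?", "\"", "<", ">", "|"] := rfl
  unfold normalize_path_chars
  rw [hk]
  simp only [List.foldl]
  rw [str_replace_single _ '|' '⏐' _ _ rfl rfl]
  rw [str_replace_single _ '>' '〉' _ _ rfl rfl]
  rw [str_replace_single _ '<' '〈' _ _ rfl rfl]
  rw [str_replace_single _ '"' 'ˮ' _ _ rfl rfl]
  rw [str_replace_single _ '?' '﹖' _ _ rfl rfl]
  rw [str_replace_single _ '*' '٭' _ _ rfl rfl]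
  rw [str_replace_single _ '\\' '∕' _ _ rfl rfl]
  rw [str_replace_single _ '/' '∕' _ _ rfl rfl]
  rw [str_replace_single _ ':' '：' _ _ rfl rfl]
  simp only [String.toList_ofList, List.map_map]
  unfold normalize_path_chars_alt
  refine congrArg String.ofList ?_
  apply List.map_congr_left
  intro c _
  simp only [Function.comp]
  have hitems : pvReplacementsAlt.items = [(':', '：'), ('/', '∕'), ('\\', '∕'), ('*', '٭'),
      ('?', '﹖'), ('"', 'ˮ'), ('<', '〈'), ('>', '〉'), ('|', '⏐')] := rfl
  by_cases h1 : c = ':'; · subst h1; rfl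
  by_cases h2 : c = '/'; · subst h2; rfl
  by_cases h3 : c = '\\'; · subst h3; rfl
  by_cases h4 : c = '*'; · subst h4; rfl
  by_cases h5 : c = '?'; · subst h5; rfl
  by_cases h6 : c = '"'; · subst h6; rfl
  by_cases h7 : c = '<'; · subst h7; rfl
  by_cases h8 : c = '>'; · subst h8; rfl
  by_cases h9 : c = '|'; · subst h9; rfl
  simp [sub, PySem.Dict.getD, PySem.Dict.get?, hitems, List.find?, h1, h2, h3, h4, h5, h6, h7, h8, h9, show (':' == c) = false by simp [Ne.symm h1], show ('/' == c) = false by simp [Ne.symm h2], show ('\\' == c) = false by simp [Ne.symm h3], show ('*' == c) = false by simp [Ne.symm h4], show ('?' == c) = false by simp [Ne.symm h5], show ('"' == c) = false by simp [Ne.symm h6], show ('<' == c) = false by simp [Ne.symm h7], show ('>' == c) = false by simp [Ne.symm h8], show ('|' == c) = false by simp [Ne.symm h9]]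

-- ===== VERDICT (by name: the statement is the Claim_ definition above) =====
theorem normalize_path_chars_spec : Claim_equal_normalize_path_chars := by
  intro path _
  unfold Spec_normalize_path_chars
  exact main_eq path
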